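-- pv_equiv track=rewrite | github.com/cys123431-ship-it/newsbot | src/newsbot/site_builder.py | _build_page_tokens
-- ===== SOURCE A (Python) =====
-- def _build_page_tokens(total_pages: int, current_page: int) -> list[int | None]:
--     if total_pages <= 7:
--         return list(range(1, total_pages + 1))
--
--     pages = {1, total_pages, current_page - 1, current_page, current_page + 1}
--     if current_page <= 3:
--         pages.update({2, 3, 4})
--     if current_page >= total_pages - 2:
--         pages.update({total_pages - 3, total_pages - 2, total_pages - 1})
--
--     tokens: list[int | None] = []
--     previous_page: int | None = None
--     for page in sorted(candidate for candidate in pages if 1 <= candidate <= total_pages):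
--         if previous_page is not None and page - previous_page > 1:
--             tokens.append(None)
--         tokens.append(page)
--         previous_page = page
--     return tokens
-- ===== SOURCE B (Python) =====
-- def _build_page_tokens(total_pages: int, current_page: int) -> list:
--     if total_pages <= 7:
--         return list(range(1, total_pages + 1))
--     if current_page <= 3:
--         return [1, 2, 3, 4, None, total_pages]
--     if current_page >= total_pages - 2:
--         return [1, None, total_pages - 3, total_pages - 2, total_pages - 1, total_pages]
--     return [1, None, current_page - 1, current_page, current_page + 1, None, total_pages]
-- ===== Notes on version B (the rewrite author's own statement) =====
-- stated objective: simpler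
-- what changed: Replaces the candidate set + sort + gap-marker scan by a direct three-way case split on current_page that returns the token list as a closed-form literal.
import Mathlib
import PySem

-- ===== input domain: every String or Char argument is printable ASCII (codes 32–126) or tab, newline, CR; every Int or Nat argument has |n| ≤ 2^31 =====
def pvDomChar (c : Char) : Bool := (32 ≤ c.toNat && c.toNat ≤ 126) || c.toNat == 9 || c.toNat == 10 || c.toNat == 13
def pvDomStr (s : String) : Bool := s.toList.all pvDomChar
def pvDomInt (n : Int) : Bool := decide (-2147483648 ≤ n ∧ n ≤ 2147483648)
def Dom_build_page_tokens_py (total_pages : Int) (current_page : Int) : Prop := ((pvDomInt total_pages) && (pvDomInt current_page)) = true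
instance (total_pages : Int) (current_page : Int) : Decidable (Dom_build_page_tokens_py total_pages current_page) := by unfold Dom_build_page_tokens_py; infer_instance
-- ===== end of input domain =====

-- B replaces A's candidate-set + sort + gap-marker scan by a closed-form three-way case split on current_page (simpler).

-- ===== PORT A =====
-- the loop body of A's 'for page in sorted(...)': append None on a gap, then the page
def pvGapStep (st : List (Option Int) × Option Int) (page : Int) : List (Option Int) × Option Int :=
  match st.2 with
  | some prev => if page - prev > 1 then (st.1 ++ [none, some page], some page)
                 else (st.1 ++ [some page], some page)
  | none => (st.1 ++ [some page], some page)

def build_page_tokens_py (total_pages : Int) (current_page : Int) : List (Option Int) :=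
  if total_pages ≤ 7 then (PySem.List.pyRange 1 (total_pages + 1) 1).map some
  else
    let pages : PySem.Set Int := PySem.Set.ofList [1, total_pages, current_page - 1, current_page, current_page + 1]
    let pages := if current_page ≤ 3 then PySem.Set.update pages [2, 3, 4] else pages
    let pages := if current_page ≥ total_pages - 2 then
        PySem.Set.update pages [total_pages - 3, total_pages - 2, total_pages - 1] else pages
    let ordered := PySem.List.sorted (pages.filter (fun c => decide (1 ≤ c) && decide (c ≤ total_pages))) (fun x => x) false
    (ordered.foldl pvGapStep ([], none)).1

-- ===== PORT B =====
def build_page_tokens_py_alt (total_pages : Int) (current_page : Int) : List (Option Int) :=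
  if total_pages ≤ 7 then (PySem.List.pyRange 1 (total_pages + 1) 1).map some
  else if current_page ≤ 3 then [some 1, some 2, some 3, some 4, none, some total_pages]
  else if current_page ≥ total_pages - 2 then
    [some 1, none, some (total_pages - 3), some (total_pages - 2), some (total_pages - 1), some total_pages]
  else
    [some 1, none, some (current_page - 1), some current_page, some (current_page + 1), none, some total_pages]

-- ===== PRECONDITION & SPEC =====
def Spec_build_page_tokens_py (total_pages : Int) (current_page : Int) (out : List (Option Int)) : Prop := out = build_page_tokens_py_alt total_pages current_page
instance (total_pages : Int) (current_page : Int) (out : List (Option Int)) : Decidable (Spec_build_page_tokens_py total_pages current_page out) := by unfold Spec_build_page_tokens_py; infer_instance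

-- ===== CLAIM (what is proved, stated in full; the proofs are below) =====
def Claim_equal_build_page_tokens_py : Prop := ∀ (total_pages : Int) (current_page : Int), Dom_build_page_tokens_py total_pages current_page → Spec_build_page_tokens_py total_pages current_page (build_page_tokens_py total_pages current_page)

-- ===== LEMMAS AND PROOFS =====

-- membership in A's candidate set, as a plain disjunction
lemma mem_pages_iff (tp cur x : Int) :
    (x ∈ (if cur ≥ tp - 2 then
            PySem.Set.update
              (if cur ≤ 3 then PySem.Set.update (PySem.Set.ofList [1, tp, cur - 1, cur, cur + 1]) [2, 3, 4]
               else PySem.Set.ofList [1, tp, cur - 1, cur, cur + 1]) [tp - 3, tp - 2, tp - 1]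
          else
            (if cur ≤ 3 then PySem.Set.update (PySem.Set.ofList [1, tp, cur - 1, cur, cur + 1]) [2, 3, 4]
             else PySem.Set.ofList [1, tp, cur - 1, cur, cur + 1]))) ↔
    (x = 1 ∨ x = tp ∨ x = cur - 1 ∨ x = cur ∨ x = cur + 1 ∨
      (cur ≤ 3 ∧ (x = 2 ∨ x = 3 ∨ x = 4)) ∨
      (cur ≥ tp - 2 ∧ (x = tp - 3 ∨ x = tp - 2 ∨ x = tp - 1))) := by
  split_ifs <;> simp_all [PySem.Set.mem_ofList] <;> omega

lemma nodup_pages (tp cur : Int) :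
    (if cur ≥ tp - 2 then
        PySem.Set.update
          (if cur ≤ 3 then PySem.Set.update (PySem.Set.ofList [1, tp, cur - 1, cur, cur + 1]) [2, 3, 4]
           else PySem.Set.ofList [1, tp, cur - 1, cur, cur + 1]) [tp - 3, tp - 2, tp - 1]
      else
        (if cur ≤ 3 then PySem.Set.update (PySem.Set.ofList [1, tp, cur - 1, cur, cur + 1]) [2, 3, 4]
         else PySem.Set.ofList [1, tp, cur - 1, cur, cur + 1])).Nodup := by
  split_ifs <;>
    first
      | exact PySem.Set.nodup_update _ _ (PySem.Set.nodup_update _ _ (PySem.Set.nodup_ofList _))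
      | exact PySem.Set.nodup_update _ _ (PySem.Set.nodup_ofList _)
      | exact PySem.Set.nodup_ofList _

-- A's sorted, range-filtered candidate list equals an explicit strictly increasing list (per case)
lemma sorted_filter_eq (tp cur : Int) (ys : List Int)
    (hnd : ys.Nodup) (hlt : ys.Pairwise (· < ·))
    (hmem : ∀ x, x ∈ ys ↔ ((x = 1 ∨ x = tp ∨ x = cur - 1 ∨ x = cur ∨ x = cur + 1 ∨
      (cur ≤ 3 ∧ (x = 2 ∨ x = 3 ∨ x = 4)) ∨
      (cur ≥ tp - 2 ∧ (x = tp - 3 ∨ x = tp - 2 ∨ x = tp - 1))) ∧ 1 ≤ x ∧ x ≤ tp)) :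
    PySem.List.sorted
      ((if cur ≥ tp - 2 then
          PySem.Set.update
            (if cur ≤ 3 then PySem.Set.update (PySem.Set.ofList [1, tp, cur - 1, cur, cur + 1]) [2, 3, 4]
             else PySem.Set.ofList [1, tp, cur - 1, cur, cur + 1]) [tp - 3, tp - 2, tp - 1]
        else
          (if cur ≤ 3 then PySem.Set.update (PySem.Set.ofList [1, tp, cur - 1, cur, cur + 1]) [2, 3, 4]
           else PySem.Set.ofList [1, tp, cur - 1, cur, cur + 1])).filter
        (fun c => decide (1 ≤ c) && decide (c ≤ tp))) (fun x => x) false = ys := by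
  apply PySem.List.sorted_eq_of_perm_of_pairwise_lt
  · rw [List.perm_ext_iff_of_nodup hnd ((nodup_pages tp cur).filter _)]
    intro x
    rw [hmem, List.mem_filter, mem_pages_iff]
    simp only [Bool.and_eq_true, decide_eq_true_eq]
    try tauto
  · exact hlt

-- ===== VERDICT (by name: the statement is the Claim_ definition above) =====
theorem build_page_tokens_py_spec : Claim_equal_build_page_tokens_py := by
  intro tp cur _
  show build_page_tokens_py tp cur = build_page_tokens_py_alt tp cur
  unfold build_page_tokens_py build_page_tokens_py_alt
  by_cases h7 : tp ≤ 7
  · simp [h7]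
  · simp only [h7, if_false]
    by_cases h3 : cur ≤ 3
    · rw [sorted_filter_eq tp cur [1, 2, 3, 4, tp]
        (by simp; omega) (by simp; omega) (by intro x; simp; omega)]
      have g1 : (1:Int) < tp - 4 := by omega
      simp [List.foldl, pvGapStep, g1, h3]
    · by_cases hr : cur ≥ tp - 2
      · rw [sorted_filter_eq tp cur [1, tp - 3, tp - 2, tp - 1, tp]
          (by simp; omega) (by simp; omega) (by intro x; simp; omega)]
        have g1 : (1:Int) < tp - 3 - 1 := by omega
        simp [List.foldl, pvGapStep, g1, h3, hr]
      · rw [sorted_filter_eq tp cur [1, cur - 1, cur, cur + 1, tp]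
          (by simp; omega) (by simp; omega) (by intro x; simp; omega)]
        have g1 : (1:Int) < cur - 1 - 1 := by omega
        have g4 : (1:Int) < tp - (cur + 1) := by omega
        simp [List.foldl, pvGapStep, g1, g4, h3, hr]
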